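-- pv_equiv track=rewrite | github.com/proboscis/pinjected | tools/wait_for_ci.py | check_workflows_complete
-- ===== SOURCE A (Python) =====
-- from typing import Dict, List, Optional, Tuple, Union
--
-- def check_workflows_complete(runs: List[Dict]) -> Tuple[bool, bool]:
--     """
--     Check if all workflows are complete and successful.
--
--     Args:
--         runs: List of workflow run data
--
--     Returns:
--         Tuple of (all_complete, all_successful)
--     """
--     if not runs:
--         return True, True
--
--     all_complete = all(run.get("status") == "completed" for run in runs)
--     all_successful = all(
--         run.get("status") == "completed" and run.get("conclusion") == "success"
--         for run in runs
--     )
--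
--     return all_complete, all_successful
-- ===== SOURCE B (Python) =====
-- def check_workflows_complete(runs):
--     n = len(runs)
--     completed = 0
--     successful = 0
--     for run in runs:
--         if run.get("status") == "completed":
--             completed += 1
--             if run.get("conclusion") == "success":
--                 successful += 1
--     return completed == n, successful == n
-- ===== Notes on version B (the rewrite author's own statement) =====
-- stated objective: alternative
-- what changed: Instead of testing universally-quantified predicates with all(), B counts the completed runs and the completed-and-successful runs in one pass and derives both booleans by comparing each count with len(runs); the nested increment means the success test is only evaluated on completed runs.
import Mathlib
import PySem

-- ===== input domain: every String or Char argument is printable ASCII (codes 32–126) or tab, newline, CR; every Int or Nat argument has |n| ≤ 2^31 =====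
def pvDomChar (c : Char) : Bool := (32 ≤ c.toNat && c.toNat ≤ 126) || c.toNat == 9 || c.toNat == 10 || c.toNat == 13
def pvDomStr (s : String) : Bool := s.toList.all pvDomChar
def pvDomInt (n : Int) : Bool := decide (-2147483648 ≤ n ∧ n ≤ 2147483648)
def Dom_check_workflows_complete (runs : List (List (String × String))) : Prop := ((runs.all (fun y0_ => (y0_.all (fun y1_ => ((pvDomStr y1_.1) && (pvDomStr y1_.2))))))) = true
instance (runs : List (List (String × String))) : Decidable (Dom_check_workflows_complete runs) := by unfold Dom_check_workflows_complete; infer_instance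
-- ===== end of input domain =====

-- B replaces A's two all() predicate passes by one counting pass (counts compared with len); same values, alternative algorithm.

-- ===== PORT A =====
-- if not runs: return True, True; then two all(...) passes
def check_workflows_complete (runs : List (List (String × String))) : Bool × Bool :=
  if runs = [] then (true, true)
  else
    let all_complete := runs.all (fun run => (PySem.Dict.mk run).get? "status" == some "completed")
    let all_successful := runs.all (fun run =>
      ((PySem.Dict.mk run).get? "status" == some "completed") &&
      ((PySem.Dict.mk run).get? "conclusion" == some "success"))
    (all_complete, all_successful)

-- ===== PORT B =====
-- one counting pass: count completed runs and (nested) successful ones, compare with len(runs)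
def check_workflows_complete_alt (runs : List (List (String × String))) : Bool × Bool :=
  let n : Int := runs.length
  let cs := runs.foldl (fun (acc : Int × Int) run =>
    if (PySem.Dict.mk run).get? "status" == some "completed" then
      if (PySem.Dict.mk run).get? "conclusion" == some "success" then
        (acc.1 + 1, acc.2 + 1)
      else (acc.1 + 1, acc.2)
    else acc) (0, 0)
  (cs.1 == n, cs.2 == n)

-- ===== PRECONDITION & SPEC =====
def Spec_check_workflows_complete (runs : List (List (String × String))) (out : Bool × Bool) : Prop := out = check_workflows_complete_alt runs
instance (runs : List (List (String × String))) (out : Bool × Bool) : Decidable (Spec_check_workflows_complete runs out) := by unfold Spec_check_workflows_complete; infer_instance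

-- ===== CLAIM (what is proved, stated in full; the proofs are below) =====
def Claim_equal_check_workflows_complete : Prop := ∀ (runs : List (List (String × String))), Dom_check_workflows_complete runs → Spec_check_workflows_complete runs (check_workflows_complete runs)

-- ===== LEMMAS AND PROOFS =====
theorem count_foldl (runs : List (List (String × String))) (c s : Int) :
    runs.foldl (fun (acc : Int × Int) run =>
      if (PySem.Dict.mk run).get? "status" == some "completed" then
        if (PySem.Dict.mk run).get? "conclusion" == some "success" then
          (acc.1 + 1, acc.2 + 1)
        else (acc.1 + 1, acc.2)
      else acc) (c, s)
    = (c + runs.countP (fun run => (PySem.Dict.mk run).get? "status" == some "completed"),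
       s + runs.countP (fun run =>
         ((PySem.Dict.mk run).get? "status" == some "completed") &&
         ((PySem.Dict.mk run).get? "conclusion" == some "success"))) := by
  induction runs generalizing c s with
  | nil => simp
  | cons r rest ih =>
    simp only [List.foldl_cons, List.countP_cons]
    by_cases h1 : (PySem.Dict.mk r).get? "status" = some "completed" <;>
      by_cases h2 : (PySem.Dict.mk r).get? "conclusion" = some "success" <;>
      (simp only [beq_iff_eq] at ih ⊢) <;>
      simp [h1, h2, ih, Prod.ext_iff] <;> omega

theorem countP_eq_len_iff_all (l : List (List (String × String))) (p : List (String × String) → Bool) :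
    ((l.countP p : Int) == (l.length : Int)) = l.all p := by
  cases hall : l.all p with
  | true =>
      have h := List.countP_eq_length.mpr (List.all_eq_true.mp hall)
      simp [h]
  | false =>
      apply beq_eq_false_iff_ne.mpr
      intro hc
      have hcc : l.countP p = l.length := by exact_mod_cast hc
      have := List.all_eq_true.mpr (List.countP_eq_length.mp hcc)
      simp [this] at hall

-- ===== VERDICT (by name: the statement is the Claim_ definition above) =====
theorem check_workflows_complete_spec : Claim_equal_check_workflows_complete := by
  intro runs _
  unfold Spec_check_workflows_complete check_workflows_complete check_workflows_complete_alt
  rw [count_foldl]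
  simp only [zero_add]
  rw [countP_eq_len_iff_all, countP_eq_len_iff_all]
  cases runs <;> simp
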